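-- pv_equiv track=rewrite | github.com/prs-eth/ResDepth | lib/rasterutils.py | create_regular_grid
-- ===== SOURCE A (Python) =====
-- def create_regular_grid(area_defn, tile_size, stride=None):
--     """
--     Defines a regular grid of (overlapping) tiles.
--
--     :param area_defn:       dictionary, defines one or multiple rectangularly-shaped geographic regions from which
--                             DSM patches will be sampled. The dictionary is composed of the following key-value pairs:
--                             x_extent:   list of n tuples, where n denotes the number of rectangular regions (stripes).
--                                         Each tuple defines the upper-left and lower-right x-coordinate of a rectangular
--                                         region (stripe).
--                             y_extent:   list of n tuples, where n denotes the number of rectangular regions (stripes).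
--                                         Each tuple defines the upper-left and lower-right y-coordinate of a rectangular
--                                         region (stripe).
--
--                             Assumption: The i.th tuple of x_extent and i.th tuple of y_extent define a geographically
--                                         rectangular region (stripe).
--
--     :param tile_size:       int, tile size in pixels
--     :param stride:          int, stride in pixels (if None: stride equals tile_size)
--
--     :return tile_position:      list of tuples, i.th tuple (uly, ulx) specifies the upper-left image coordinates of the
--                                 i.th tile (w.r.t. the full raster)
--     :return region_wo_overlap:  list of tuples, i.th tuple (uly, ulx, lry, lrx) specifies the pixels of the i.th tile
--                                 that do not overlap with any other tile
--     """
--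
--     if stride is None:
--         stride = tile_size
--
--     tile_position = []
--     region_wo_overlap = []
--
--     # Number of regions specified in area_defn
--     num_regions = len(area_defn['x_extent'])
--
--     # Iterate over each region
--     for i in range(num_regions):
--         # Extent of the i.th region
--         x = area_defn['x_extent'][i]
--         y = area_defn['y_extent'][i]
--
--         # Upper-left coordinates of the tile (w.r.t. full raster)
--         uly = y[0]
--         lry = y[0]
--
--         # Initialization
--         border_uly = 0
--         border_lry = stride - 1
--
--         # Split the i.th region into a grid of regular tiles
--         while lry < y[1]:
--             # Initialization
--             ulx = x[0]
--             lrx = x[0]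
--             border_ulx = 0
--             border_lrx = stride - 1
--
--             # Compute the lower-right y-coordinate of the tile
--             lry = uly + tile_size - 1
--
--             # Check if the tile overlaps the region (in y-direction): if yes, shift the tile upwards such that its
--             # lower border coincides with the lower border of the region
--             if lry >= y[1]:
--                 border_uly += lry - y[1]
--                 lry = y[1]
--                 uly = y[1] - tile_size + 1
--                 border_lry = tile_size - 1
--
--             while lrx < x[1]:
--                 # Compute lower-right x-coordinate of the tile
--                 lrx = ulx + tile_size - 1
--
--                 # Check if the tile overlaps the area (in x-direction): if yes, shift the tile to the left such that
--                 # its right border coincides with the right border of the region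
--                 if lrx >= x[1]:
--                     border_ulx += lrx - x[1]
--                     lrx = x[1]
--                     ulx = x[1] - tile_size + 1
--                     border_lrx = tile_size - 1
--
--                 # Save the upper-left corner coordinates of the tile
--                 tile_position.append((int(uly), int(ulx)))
--
--                 # Save the pixels of the tile that do not overlap with any other tile
--                 region_wo_overlap.append((int(border_uly), int(border_ulx), int(border_lry), int(border_lrx)))
--
--                 ulx += stride
--                 border_ulx = tile_size - stride
--
--             uly += stride
--             border_uly = tile_size - stride
--
--     return tile_position, region_wo_overlap
-- ===== SOURCE B (Python) =====
-- def create_regular_grid(area_defn, tile_size, stride=None):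
--     """Same grid, but computed as two independent 1-D axis sweeps whose
--     cartesian product (y-major, x-minor) gives the tiles."""
--     if stride is None:
--         stride = tile_size
--
--     def axis_entries(lo, hi):
--         # one 1-D sweep: (upper-left coord, border start, border end) per step
--         entries = []
--         ul = lo
--         lr = lo
--         b_ul = 0
--         b_lr = stride - 1
--         while lr < hi:
--             lr = ul + tile_size - 1
--             if lr >= hi:
--                 b_ul += lr - hi
--                 lr = hi
--                 ul = hi - tile_size + 1
--                 b_lr = tile_size - 1
--             entries.append((int(ul), int(b_ul), int(b_lr)))
--             ul += stride
--             b_ul = tile_size - stride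
--         return entries
--
--     tile_position = []
--     region_wo_overlap = []
--     for x, y in zip(area_defn['x_extent'], area_defn['y_extent']):
--         y_entries = axis_entries(y[0], y[1])
--         x_entries = axis_entries(x[0], x[1])
--         for uly, b_uly, b_lry in y_entries:
--             for ulx, b_ulx, b_lrx in x_entries:
--                 tile_position.append((uly, ulx))
--                 region_wo_overlap.append((b_uly, b_ulx, b_lry, b_lrx))
--     return tile_position, region_wo_overlap
-- ===== Notes on version B (the rewrite author's own statement) =====
-- stated objective: alternative
-- what changed: A's interleaved nested while-sweep over each 2-D region is replaced by one reusable 1-D axis sweep run once per axis, whose cartesian product (y-major, x-minor) yields the same tile list.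
-- outside the precondition, e.g. on create_regular_grid({'x_extent': []}, 1, None): A returns ([], []), B raises KeyError
import Mathlib
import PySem

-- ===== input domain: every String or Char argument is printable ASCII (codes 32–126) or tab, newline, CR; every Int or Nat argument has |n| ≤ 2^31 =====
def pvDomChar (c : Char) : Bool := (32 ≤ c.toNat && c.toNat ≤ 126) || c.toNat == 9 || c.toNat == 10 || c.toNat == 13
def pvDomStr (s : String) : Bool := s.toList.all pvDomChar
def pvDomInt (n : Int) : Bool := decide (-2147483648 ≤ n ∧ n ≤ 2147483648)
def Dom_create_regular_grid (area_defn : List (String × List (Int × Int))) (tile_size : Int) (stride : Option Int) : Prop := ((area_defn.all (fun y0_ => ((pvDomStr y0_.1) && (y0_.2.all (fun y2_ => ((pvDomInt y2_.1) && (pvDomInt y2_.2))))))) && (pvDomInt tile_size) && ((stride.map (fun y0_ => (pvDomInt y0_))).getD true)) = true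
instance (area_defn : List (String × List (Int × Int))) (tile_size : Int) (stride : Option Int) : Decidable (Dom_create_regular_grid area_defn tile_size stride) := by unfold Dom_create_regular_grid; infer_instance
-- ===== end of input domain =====

-- B replaces A's interleaved nested 2-D while-sweep by a single reusable 1-D axis sweep,
-- run once per axis, whose cartesian product (y-major, x-minor) yields the same tiles (alternative decomposition, same cost).

-- ===== PORT A =====
-- Fuel bound for A's fueled while-loops (ample whenever the effective stride is ≥ 1;
-- where it would not suffice the Python loops do not terminate and Pre_ excludes the input).
def pvFuelA (lo hi ts : Int) : Nat := (hi - lo).toNat + ts.natAbs + 2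
-- inner 'while lrx < x[1]' of A, with the fixed y-state (uly, buly, blry) of the current row
def loopAx (tile stride x1 uly buly blry : Int) :
    Nat → Int → Int → Int → Int → List (Int × Int) → List (Int × Int × Int × Int) →
    (List (Int × Int)) × (List (Int × Int × Int × Int))
  | 0, _, _, _, _, pos, reg => (pos, reg)
  | fuel+1, ulx, lrx, bulx, blrx, pos, reg =>
    if lrx < x1 then
      let lrx2 := ulx + tile - 1
      if lrx2 ≥ x1 then
        loopAx tile stride x1 uly buly blry fuel
          ((x1 - tile + 1) + stride) x1 (tile - stride) (tile - 1)
          (pos ++ [(uly, x1 - tile + 1)]) (reg ++ [(buly, bulx + (lrx2 - x1), blry, tile - 1)])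
      else
        loopAx tile stride x1 uly buly blry fuel
          (ulx + stride) lrx2 (tile - stride) blrx
          (pos ++ [(uly, ulx)]) (reg ++ [(buly, bulx, blry, blrx)])
    else (pos, reg)

-- outer 'while lry < y[1]' of A
def loopAy (tile stride x0 x1 y1 : Int) :
    Nat → Int → Int → Int → Int → List (Int × Int) → List (Int × Int × Int × Int) →
    (List (Int × Int)) × (List (Int × Int × Int × Int))
  | 0, _, _, _, _, pos, reg => (pos, reg)
  | fuel+1, uly, lry, buly, blry, pos, reg =>
    if lry < y1 then
      let lry2 := uly + tile - 1
      if lry2 ≥ y1 then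
        let r := loopAx tile stride x1 (y1 - tile + 1) (buly + (lry2 - y1)) (tile - 1)
          (pvFuelA x0 x1 tile) x0 x0 0 (stride - 1) pos reg
        loopAy tile stride x0 x1 y1 fuel
          ((y1 - tile + 1) + stride) y1 (tile - stride) (tile - 1) r.1 r.2
      else
        let r := loopAx tile stride x1 uly buly blry
          (pvFuelA x0 x1 tile) x0 x0 0 (stride - 1) pos reg
        loopAy tile stride x0 x1 y1 fuel
          (uly + stride) lry2 (tile - stride) blry r.1 r.2
    else (pos, reg)

-- 'for i in range(num_regions)' of A, walking the two extent lists in step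
def regionsA (tile stride : Int) :
    List (Int × Int) → List (Int × Int) → (List (Int × Int)) × (List (Int × Int × Int × Int)) →
    (List (Int × Int)) × (List (Int × Int × Int × Int))
  | [], _, s => s
  | _ :: _, [], s => s    -- Python raises IndexError here (y_extent shorter); outside Pre_
  | x :: xs, y :: ys, s =>
      regionsA tile stride xs ys
        (loopAy tile stride x.1 x.2 y.2 (pvFuelA y.1 y.2 tile) y.1 y.1 0 (stride - 1) s.1 s.2)

def create_regular_grid (area_defn : List (String × List (Int × Int))) (tile_size : Int) (stride : Option Int) : (List (Int × Int)) × (List (Int × Int × Int × Int)) :=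
  let strideV := stride.getD tile_size
  match (PySem.Dict.mk area_defn).get? "x_extent", (PySem.Dict.mk area_defn).get? "y_extent" with
  | some xs, some ys => regionsA tile_size strideV xs ys ([], [])
  | _, _ => ([], [])    -- Python raises KeyError (unless x_extent is present and empty); outside Pre_

-- ===== PORT B =====
-- B's 1-D axis sweep: entries (ul, border_ul, border_lr), one per while-iteration
def axisSteps (tile stride hi : Int) :
    Nat → Int → Int → Int → Int → List (Int × Int × Int) → List (Int × Int × Int)
  | 0, _, _, _, _, es => es
  | fuel+1, ul, lr, bul, blr, es =>
    if lr < hi then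
      let lr2 := ul + tile - 1
      if lr2 ≥ hi then
        axisSteps tile stride hi fuel
          ((hi - tile + 1) + stride) hi (tile - stride) (tile - 1)
          (es ++ [(hi - tile + 1, bul + (lr2 - hi), tile - 1)])
      else
        axisSteps tile stride hi fuel
          (ul + stride) lr2 (tile - stride) blr
          (es ++ [(ul, bul, blr)])
    else es

-- same fuel bound, B's own copy (ample under Pre_; see pvFuelA's comment)
def pvFuelB (lo hi ts : Int) : Nat := (hi - lo).toNat + ts.natAbs + 2

def axisEntries (tile stride lo hi : Int) : List (Int × Int × Int) :=
  axisSteps tile stride hi (pvFuelB lo hi tile) lo lo 0 (stride - 1) []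

def prodStep (xE : List (Int × Int × Int))
    (acc : (List (Int × Int)) × (List (Int × Int × Int × Int))) (ye : Int × Int × Int) :
    (List (Int × Int)) × (List (Int × Int × Int × Int)) :=
  xE.foldl (fun acc xe =>
    (acc.1 ++ [(ye.1, xe.1)], acc.2 ++ [(ye.2.1, xe.2.1, ye.2.2, xe.2.2)])) acc

def create_regular_grid_alt (area_defn : List (String × List (Int × Int))) (tile_size : Int) (stride : Option Int) : (List (Int × Int)) × (List (Int × Int × Int × Int)) :=
  let strideV := stride.getD tile_size
  match (PySem.Dict.mk area_defn).get? "x_extent" with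
  | none => ([], [])    -- Python raises KeyError; outside Pre_
  | some xs =>
    match (PySem.Dict.mk area_defn).get? "y_extent" with
    | none => ([], [])    -- Python raises KeyError; outside Pre_
    | some ys =>
        (xs.zip ys).foldl (fun acc xy =>
          (axisEntries tile_size strideV xy.2.1 xy.2.2).foldl
            (prodStep (axisEntries tile_size strideV xy.1.1 xy.1.2)) acc)
          (([], []) : (List (Int × Int)) × (List (Int × Int × Int × Int)))

-- ===== PRECONDITION & SPEC =====
-- Pre_ requires both extent keys, y_extent at least as long as x_extent (else A raises KeyError/IndexError),
-- and termination of the sweeps: effective stride ≥ 1, or every region degenerate/single-tile on BOTH axes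
-- (with non-positive stride the loops otherwise run forever; the both-axes form also excludes the rare
-- inputs whose empty y-extent makes A skip a region whose x-sweep alone would not terminate — see cites).
def Pre_create_regular_grid (area_defn : List (String × List (Int × Int))) (tile_size : Int) (stride : Option Int) : Prop :=
  let xo := (PySem.Dict.mk area_defn).get? "x_extent"
  let yo := (PySem.Dict.mk area_defn).get? "y_extent"
  xo.isSome = true ∧ yo.isSome = true ∧
  (xo.getD []).length ≤ (yo.getD []).length ∧
  (1 ≤ stride.getD tile_size ∨
    ∀ p ∈ (xo.getD []).zip (yo.getD []),
      (p.2.2 ≤ p.2.1 ∨ p.2.2 ≤ p.2.1 + tile_size - 1) ∧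
      (p.1.2 ≤ p.1.1 ∨ p.1.2 ≤ p.1.1 + tile_size - 1))
instance (area_defn : List (String × List (Int × Int))) (tile_size : Int) (stride : Option Int) : Decidable (Pre_create_regular_grid area_defn tile_size stride) := by
  unfold Pre_create_regular_grid; infer_instance

def pvWitness_create_regular_grid : (List (String × List (Int × Int))) × Int × Option Int :=
  ([("x_extent", [(0, 10)]), ("y_extent", [(0, 8)])], 4, some 3)

def Spec_create_regular_grid (area_defn : List (String × List (Int × Int))) (tile_size : Int) (stride : Option Int) (out : (List (Int × Int)) × (List (Int × Int × Int × Int))) : Prop := out = create_regular_grid_alt area_defn tile_size stride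
instance (area_defn : List (String × List (Int × Int))) (tile_size : Int) (stride : Option Int) (out : (List (Int × Int)) × (List (Int × Int × Int × Int))) : Decidable (Spec_create_regular_grid area_defn tile_size stride out) := by unfold Spec_create_regular_grid; infer_instance

-- ===== CLAIM (what is proved, stated in full; the proofs are below) =====
def Claim_equal_create_regular_grid : Prop := ∀ (area_defn : List (String × List (Int × Int))) (tile_size : Int) (stride : Option Int), Dom_create_regular_grid area_defn tile_size stride → Pre_create_regular_grid area_defn tile_size stride → Spec_create_regular_grid area_defn tile_size stride (create_regular_grid area_defn tile_size stride)

-- ===== LEMMAS AND PROOFS =====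

-- accumulator lemma for the axis sweep
theorem axisSteps_acc (tile stride hi : Int) :
    ∀ (fuel : Nat) (ul lr bul blr : Int) (es : List (Int × Int × Int)),
      axisSteps tile stride hi fuel ul lr bul blr es
        = es ++ axisSteps tile stride hi fuel ul lr bul blr [] := by
  intro fuel
  induction fuel with
  | zero => intro ul lr bul blr es; simp [axisSteps]
  | succ n ih =>
      intro ul lr bul blr es
      simp only [axisSteps]
      split_ifs with h1 h2
      · rw [ih _ _ _ _ (es ++ _), ih _ _ _ _ ([] ++ _)]; simp
      · rw [ih _ _ _ _ (es ++ _), ih _ _ _ _ ([] ++ _)]; simp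
      · simp

-- A's inner x-loop is the fold of B's axis sweep over the fixed y-state
theorem loopAx_eq (tile stride x1 uly buly blry : Int) :
    ∀ (fuel : Nat) (ulx lrx bulx blrx : Int) pos reg,
      loopAx tile stride x1 uly buly blry fuel ulx lrx bulx blrx pos reg
        = (axisSteps tile stride x1 fuel ulx lrx bulx blrx []).foldl
            (fun acc xe => (acc.1 ++ [(uly, xe.1)], acc.2 ++ [(buly, xe.2.1, blry, xe.2.2)]))
            (pos, reg) := by
  intro fuel
  induction fuel with
  | zero => intro ulx lrx bulx blrx pos reg; simp [loopAx, axisSteps]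
  | succ n ih =>
      intro ulx lrx bulx blrx pos reg
      simp only [loopAx, axisSteps]
      split_ifs with h1 h2
      · rw [ih]; conv_rhs => rw [axisSteps_acc]
        simp
      · rw [ih]; conv_rhs => rw [axisSteps_acc]
        simp
      · simp

-- A's outer y-loop is the fold of B's y-axis sweep of per-row products
theorem loopAy_eq (tile stride x0 x1 y1 : Int) :
    ∀ (fuel : Nat) (uly lry buly blry : Int) pos reg,
      loopAy tile stride x0 x1 y1 fuel uly lry buly blry pos reg
        = (axisSteps tile stride y1 fuel uly lry buly blry []).foldl
            (prodStep (axisEntries tile stride x0 x1)) (pos, reg) := by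
  intro fuel
  induction fuel with
  | zero => intro uly lry buly blry pos reg; simp [loopAy, axisSteps]
  | succ n ih =>
      intro uly lry buly blry pos reg
      simp only [loopAy, axisSteps]
      split_ifs with h1 h2
      · rw [loopAx_eq, ih]; conv_rhs => rw [axisSteps_acc]
        simp [prodStep, axisEntries, pvFuelA, pvFuelB]
      · rw [loopAx_eq, ih]; conv_rhs => rw [axisSteps_acc]
        simp [prodStep, axisEntries, pvFuelA, pvFuelB]
      · simp

-- the region loops agree
theorem regionsA_eq (tile stride : Int) :
    ∀ (xs ys : List (Int × Int)) (s : (List (Int × Int)) × (List (Int × Int × Int × Int))),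
      regionsA tile stride xs ys s
        = (xs.zip ys).foldl (fun acc xy =>
            (axisEntries tile stride xy.2.1 xy.2.2).foldl
              (prodStep (axisEntries tile stride xy.1.1 xy.1.2)) acc) s := by
  intro xs
  induction xs with
  | nil => intro ys s; cases ys <;> simp [regionsA]
  | cons x xs ih =>
      intro ys s
      cases ys with
      | nil => simp [regionsA]
      | cons y ys =>
          simp only [regionsA, List.zip_cons_cons, List.foldl_cons]
          rw [ih, loopAy_eq]
          rfl

-- ===== VERDICT (by name: the statement is the Claim_ definition above) =====
theorem create_regular_grid_spec : Claim_equal_create_regular_grid := by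
  intro area_defn tile_size stride _hDom _hPre
  unfold Spec_create_regular_grid create_regular_grid create_regular_grid_alt
  cases hx : (PySem.Dict.mk area_defn).get? "x_extent" with
  | none => rfl
  | some xs =>
      cases hy : (PySem.Dict.mk area_defn).get? "y_extent" with
      | none => rfl
      | some ys =>
          change regionsA tile_size (stride.getD tile_size) xs ys ([], [])
            = (xs.zip ys).foldl (fun acc xy =>
                (axisEntries tile_size (stride.getD tile_size) xy.2.1 xy.2.2).foldl
                  (prodStep (axisEntries tile_size (stride.getD tile_size) xy.1.1 xy.1.2)) acc)
              ([], [])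
          exact regionsA_eq tile_size (stride.getD tile_size) xs ys ([], [])
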